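-- pv_equiv track=rewrite | github.com/nielpal99/finance-rag | ingestion/transcript_browser.py | last_n_calendar_quarters
-- ===== SOURCE A (Python) =====
-- def last_n_calendar_quarters(n: int) -> list:
--     year, q = 2025, 4
--     quarters = []
--     for _ in range(n):
--         quarters.append((year, q))
--         q -= 1
--         if q == 0:
--             q, year = 4, year - 1
--     return quarters
-- ===== SOURCE B (Python) =====
-- def last_n_calendar_quarters(n: int) -> list:
--     # Closed form: quarter index t = year*4 + (q-1); base 2025Q4 -> 8103.
--     return [((8103 - i) // 4, (8103 - i) % 4 + 1) for i in range(n)]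
-- ===== Notes on version B (the rewrite author's own statement) =====
-- stated objective: idiomatic
-- what changed: Replaces the mutable year/quarter decrement-and-wrap loop with a one-line comprehension that decodes each quarter from a single integer index (t = 8103 - i; year = t // 4, q = t % 4 + 1).
import Mathlib
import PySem

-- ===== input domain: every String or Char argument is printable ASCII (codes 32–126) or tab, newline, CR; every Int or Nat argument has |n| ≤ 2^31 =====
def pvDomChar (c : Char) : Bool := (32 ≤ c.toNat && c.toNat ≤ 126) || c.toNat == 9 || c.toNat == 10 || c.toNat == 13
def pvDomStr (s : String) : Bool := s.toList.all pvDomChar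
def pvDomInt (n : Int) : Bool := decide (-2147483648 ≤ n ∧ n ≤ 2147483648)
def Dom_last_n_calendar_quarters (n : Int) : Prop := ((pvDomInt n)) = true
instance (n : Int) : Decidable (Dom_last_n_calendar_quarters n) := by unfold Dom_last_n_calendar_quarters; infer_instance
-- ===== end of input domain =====

-- B replaces A's mutable year/quarter decrement-and-wrap loop by a closed-form
-- modular decode of a single quarter index (idiomatic comprehension); same values.

-- ===== PORT A =====
-- A's loop body as a step on the state (year, q, quarters)
def lastQStep (st : Int × Int × List (Int × Int)) : Int × Int × List (Int × Int) :=
  let quarters := st.2.2 ++ [(st.1, st.2.1)]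
  let q := st.2.1 - 1
  if q == 0 then (st.1 - 1, 4, quarters) else (st.1, q, quarters)

def last_n_calendar_quarters (n : Int) : List (Int × Int) :=
  ((PySem.List.pyRange 0 n 1).foldl (fun st _ => lastQStep st) (2025, 4, [])).2.2

-- ===== PORT B =====
def last_n_calendar_quarters_alt (n : Int) : List (Int × Int) :=
  (PySem.List.pyRange 0 n 1).map
    (fun i => (PySem.Int.floordiv (8103 - i) 4, PySem.Int.mod (8103 - i) 4 + 1))

-- ===== PRECONDITION & SPEC =====
def Spec_last_n_calendar_quarters (n : Int) (out : List (Int × Int)) : Prop := out = last_n_calendar_quarters_alt n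
instance (n : Int) (out : List (Int × Int)) : Decidable (Spec_last_n_calendar_quarters n out) := by unfold Spec_last_n_calendar_quarters; infer_instance

-- ===== CLAIM (what is proved, stated in full; the proofs are below) =====
def Claim_equal_last_n_calendar_quarters : Prop := ∀ (n : Int), Dom_last_n_calendar_quarters n → Spec_last_n_calendar_quarters n (last_n_calendar_quarters n)

-- ===== LEMMAS AND PROOFS =====

-- the decoded entry B produces for index i
def lastQDec (i : Int) : Int × Int :=
  (PySem.Int.floordiv (8103 - i) 4, PySem.Int.mod (8103 - i) 4 + 1)

-- the fold ignores the list elements: it is iteration of the step, length many times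
lemma foldl_lastQStep_eq_iterate (L : List Int) (st : Int × Int × List (Int × Int)) :
    L.foldl (fun st _ => lastQStep st) st = lastQStep^[L.length] st := by
  induction L generalizing st with
  | nil => rfl
  | cons x xs ih => simpa [Function.iterate_succ_apply] using ih (lastQStep st)

-- invariant: after m iterations the state is the modular decode of index m,
-- and the accumulator holds the decodes of 0..m-1
lemma iterate_lastQStep (m : Nat) :
    lastQStep^[m] (2025, 4, []) =
      (PySem.Int.floordiv (8103 - (m : Int)) 4, PySem.Int.mod (8103 - (m : Int)) 4 + 1,
        (List.range m).map (fun k => lastQDec (k : Int))) := by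
  induction m with
  | zero => decide
  | succ m ih =>
    rw [Function.iterate_succ_apply', ih]
    have h4 : (0:Int) < 4 := by decide
    simp only [lastQStep, lastQDec, List.range_succ, beq_iff_eq,
      PySem.Int.floordiv_eq_ediv_of_pos h4, PySem.Int.mod_eq_emod_of_pos h4]
    push_cast
    split_ifs with h <;>
      · simp only [Prod.mk.injEq]
        exact ⟨by omega, by omega, by simp⟩

-- ===== VERDICT (by name: the statement is the Claim_ definition above) =====
theorem last_n_calendar_quarters_spec : Claim_equal_last_n_calendar_quarters := by
  intro n _
  show _ = _
  unfold last_n_calendar_quarters last_n_calendar_quarters_alt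
  rw [foldl_lastQStep_eq_iterate, PySem.List.length_pyRange_one, iterate_lastQStep,
    PySem.List.pyRange_one, List.map_map]
  simp [lastQDec, Function.comp_def, ← List.map_eq_flatMap]
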